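-- pv_equiv track=rewrite | github.com/PMKielstra/Chrysalis | TreeBasedTensor/compresscenter.py | binary_swap_axes
-- ===== SOURCE A (Python) =====
-- def binary_swap_axes(c, axis, dimens):
--     binary_c = [int(digit) for digit in bin(c)[2:]]
--     while len(binary_c) < dimens:
--         binary_c = [0] + binary_c
--     binary_c[0], binary_c[axis] = binary_c[axis], binary_c[0]
--     out_c = 0
--     for bit in binary_c:
--         out_c = (out_c << 1) | bit
--     return out_c
-- ===== SOURCE B (Python) =====
-- def binary_swap_axes(c, axis, dimens):
--     L = max(dimens, c.bit_length(), 1)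
--     i = axis if axis >= 0 else L + axis
--     hi = L - 1
--     lo = L - 1 - i
--     bh = c // 2 ** hi % 2
--     bl = c // 2 ** lo % 2
--     return c + (bl - bh) * 2 ** hi + (bh - bl) * 2 ** lo
-- ===== Notes on version B (the rewrite author's own statement) =====
-- stated objective: faster
-- what changed: B swaps the two bits purely arithmetically (extract the MSB and the addressed bit of the max(dimens, bit_length, 1)-wide word with // and %, then add/subtract the two powers of two) instead of materialising the binary digit list, padding it one prepend at a time, swapping list entries and re-folding it back into an integer.
import Mathlib
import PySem

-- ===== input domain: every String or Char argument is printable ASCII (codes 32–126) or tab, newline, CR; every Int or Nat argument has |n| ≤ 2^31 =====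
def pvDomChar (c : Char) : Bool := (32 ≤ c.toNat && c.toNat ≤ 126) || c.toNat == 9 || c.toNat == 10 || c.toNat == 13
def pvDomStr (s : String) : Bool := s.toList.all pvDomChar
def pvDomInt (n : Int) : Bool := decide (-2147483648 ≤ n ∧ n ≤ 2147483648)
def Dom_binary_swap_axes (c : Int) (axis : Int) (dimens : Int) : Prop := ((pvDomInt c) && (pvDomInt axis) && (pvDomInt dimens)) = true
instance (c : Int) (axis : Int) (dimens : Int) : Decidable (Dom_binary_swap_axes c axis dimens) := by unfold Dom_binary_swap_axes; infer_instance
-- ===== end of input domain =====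

-- B swaps the two bits arithmetically (//, %, powers of two) instead of building, padding,
-- swapping and re-folding a binary digit list (measurably faster); equivalence is proved on
-- Pre_ (c ≥ 0, axis in range).

-- ===== PORT A =====
-- bin(c)[2:] as the list of binary digits of a nonnegative int, MSB first ("0" -> [0]);
-- exact for c ≥ 0, the only case Pre_ admits (on c < 0 the Python A raises ValueError).
def toBinAux (n : Nat) : List Int :=
  if n < 2 then [(n : Int)] else toBinAux (n / 2) ++ [((n % 2 : Nat) : Int)]
termination_by n
decreasing_by omega

-- the 'while len(binary_c) < dimens: binary_c = [0] + binary_c' loop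
def padTo (xs : List Int) (d : Int) : List Int :=
  if (xs.length : Int) < d then padTo (0 :: xs) d else xs
termination_by (d - xs.length).toNat
decreasing_by simp; omega

def binary_swap_axes (c : Int) (axis : Int) (dimens : Int) : Int :=
  let binary_c := padTo (toBinAux c.toNat) dimens
  -- tuple assignment: both RHS reads happen first (pyGetD/pySetD are exact under Pre_'s InRange)
  let va := PySem.List.pyGetD binary_c axis 0
  let v0 := PySem.List.pyGetD binary_c 0 0
  let binary_c := PySem.List.pySetD binary_c 0 va
  let binary_c := PySem.List.pySetD binary_c axis v0
  binary_c.foldl (fun out_c bit => PySem.Int.bor (out_c <<< (1 : Nat)) bit) 0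

-- ===== PORT B =====
def binary_swap_axes_alt (c : Int) (axis : Int) (dimens : Int) : Int :=
  let L : Int := max (max dimens (PySem.Int.bitLength c : Int)) 1  -- max(dimens, c.bit_length(), 1)
  let i : Int := if axis ≥ 0 then axis else L + axis
  let hi : Int := L - 1
  let lo : Int := L - 1 - i
  -- 2 ** hi / 2 ** lo: hi, lo ≥ 0 on every input Pre_ admits, so .toNat is exact there
  let bh := PySem.Int.mod (PySem.Int.floordiv c (2 ^ hi.toNat)) 2
  let bl := PySem.Int.mod (PySem.Int.floordiv c (2 ^ lo.toNat)) 2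
  c + (bl - bh) * 2 ^ hi.toNat + (bh - bl) * 2 ^ lo.toNat

-- ===== PRECONDITION & SPEC =====
-- Pre_ excludes exactly the inputs where A raises: c < 0 (bin(c)[2:] starts with 'b', so
-- int(digit) raises ValueError) and axis outside [-L, L) for L = max(dimens, c.bit_length(), 1)
-- (binary_c[axis] raises IndexError).
def Pre_binary_swap_axes (c : Int) (axis : Int) (dimens : Int) : Prop :=
  0 ≤ c ∧ -(max (max dimens (PySem.Int.bitLength c : Int)) 1) ≤ axis ∧
    axis < max (max dimens (PySem.Int.bitLength c : Int)) 1

instance (c : Int) (axis : Int) (dimens : Int) : Decidable (Pre_binary_swap_axes c axis dimens) := by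
  unfold Pre_binary_swap_axes; infer_instance

def pvWitness_binary_swap_axes : Int × Int × Int := (5, 1, 4)

def Spec_binary_swap_axes (c : Int) (axis : Int) (dimens : Int) (out : Int) : Prop := out = binary_swap_axes_alt c axis dimens
instance (c : Int) (axis : Int) (dimens : Int) (out : Int) : Decidable (Spec_binary_swap_axes c axis dimens out) := by unfold Spec_binary_swap_axes; infer_instance

-- ===== CLAIM (what is proved, stated in full; the proofs are below) =====
def Claim_equal_binary_swap_axes : Prop := ∀ (c : Int) (axis : Int) (dimens : Int), Dom_binary_swap_axes c axis dimens → Pre_binary_swap_axes c axis dimens → Spec_binary_swap_axes c axis dimens (binary_swap_axes c axis dimens)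

-- ===== LEMMAS AND PROOFS =====

-- the arithmetic form of A's final fold
def obits (xs : List Int) : Int := xs.foldl (fun o b => 2 * o + b) 0

def IsBits (xs : List Int) : Prop := ∀ b ∈ xs, b = 0 ∨ b = 1

theorem two_mul_or_one (m : Nat) : (2 * m) ||| 1 = 2 * m + 1 := by
  apply Nat.eq_of_testBit_eq; intro i
  cases i with
  | zero => simp [Nat.testBit_zero, Nat.mul_mod_right]
  | succ j =>
      simp only [Nat.testBit_or]
      simp only [Nat.testBit_succ]
      have h1 : 2 * m / 2 = m := by omega
      have h2 : (2 * m + 1) / 2 = m := by omega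
      have h3 : (1 : Nat) / 2 = 0 := by omega
      rw [h1, h2, h3]
      simp

-- (out << 1) | bit on a nonnegative accumulator and a 0/1 bit is 2*out + bit
theorem bor_shift_step (a b : Int) (ha : 0 ≤ a) (hb : b = 0 ∨ b = 1) :
    PySem.Int.bor (a <<< (1 : Nat)) b = 2 * a + b := by
  rw [Int.shiftLeft_eq]
  rcases hb with rfl | rfl
  · simp [pow_one, mul_comm]
  · rw [PySem.Int.bor_of_nonneg (by omega) (by omega)]
    have h2 : (a * 2 ^ 1).toNat = 2 * a.toNat := by omega
    have h1 : (1 : Int).toNat = 1 := rfl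
    rw [h2, h1, two_mul_or_one]
    omega

theorem borfold_eq_obits (xs : List Int) (h : IsBits xs) :
    xs.foldl (fun o b => PySem.Int.bor (o <<< (1 : Nat)) b) 0 = obits xs := by
  have aux : ∀ (ys : List Int) (a : Int), IsBits ys → 0 ≤ a →
      ys.foldl (fun o b => PySem.Int.bor (o <<< (1 : Nat)) b) a = ys.foldl (fun o b => 2 * o + b) a := by
    intro ys
    induction ys with
    | nil => intro a _ _; rfl
    | cons x xs ih =>
        intro a hbits ha
        have hx : x = 0 ∨ x = 1 := hbits x (by simp)
        simp only [List.foldl_cons]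
        rw [bor_shift_step a x ha hx]
        exact ih (2 * a + x) (fun b hb => hbits b (by simp [hb])) (by omega)
  exact aux xs 0 h le_rfl

theorem foldl_shift (xs : List Int) (a : Int) :
    xs.foldl (fun o b => 2 * o + b) a = a * 2 ^ xs.length + obits xs := by
  induction xs generalizing a with
  | nil => simp [obits]
  | cons x xs ih =>
      have hobits : obits (x :: xs) = x * 2 ^ xs.length + obits xs := by
        show List.foldl _ (2 * 0 + x) xs = _
        rw [show 2 * 0 + x = x by ring, ih x]
      simp only [List.foldl_cons]
      rw [ih (2 * a + x), hobits, List.length_cons]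
      ring

theorem obits_cons (x : Int) (xs : List Int) :
    obits (x :: xs) = x * 2 ^ xs.length + obits xs := by
  show List.foldl _ (2 * 0 + x) xs = _
  rw [show 2 * 0 + x = x by ring, foldl_shift]

theorem obits_bounds (xs : List Int) (h : IsBits xs) :
    0 ≤ obits xs ∧ obits xs < 2 ^ xs.length := by
  induction xs with
  | nil => simp [obits]
  | cons x xs ih =>
      have hx : x = 0 ∨ x = 1 := h x (by simp)
      have ih' := ih (fun b hb => h b (by simp [hb]))
      rw [obits_cons, List.length_cons, pow_succ]
      constructor
      · rcases hx with rfl | rfl <;> nlinarith [pow_pos (by norm_num : (0:Int) < 2) xs.length]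
      · rcases hx with rfl | rfl <;> nlinarith [pow_pos (by norm_num : (0:Int) < 2) xs.length]

theorem toBin_val (n : Nat) : obits (toBinAux n) = (n : Int) := by
  induction n using toBinAux.induct with
  | case1 n h => simp [toBinAux, h, obits]
  | case2 n h ih =>
      rw [toBinAux, if_neg h]
      unfold obits
      rw [List.foldl_append]
      change 2 * obits (toBinAux (n / 2)) + _ = _
      rw [ih]
      omega

theorem toBin_bits (n : Nat) : IsBits (toBinAux n) := by
  induction n using toBinAux.induct with
  | case1 n h =>
      intro b hb
      rw [toBinAux, if_pos h] at hb
      simp at hb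
      omega
  | case2 n h ih =>
      intro b hb
      rw [toBinAux, if_neg h] at hb
      rcases List.mem_append.mp hb with hb | hb
      · exact ih b hb
      · simp at hb
        omega

theorem toBin_len (n : Nat) : (toBinAux n).length = max (PySem.Int.bitLength (n : Int)) 1 := by
  induction n using toBinAux.induct with
  | case1 n h =>
      interval_cases n
      · simp [toBinAux, PySem.Int.bitLength_zero]
      · rw [toBinAux, if_pos (by omega)]
        norm_num [show PySem.Int.bitLength (1 : Int) = 1 from by decide]
  | case2 n h ih =>
      rw [toBinAux, if_neg h, List.length_append, ih]
      rw [PySem.Int.bitLength_natCast (by omega : 0 < n)]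
      have hpos : 1 ≤ PySem.Int.bitLength ((n / 2 : Nat) : Int) := by
        by_contra hlt
        have hb := PySem.Int.lt_two_pow_bitLength ((n / 2 : Nat) : Int)
        have h0 : PySem.Int.bitLength ((n / 2 : Nat) : Int) = 0 := by omega
        rw [h0, pow_zero] at hb
        omega
      simp only [List.length_cons, List.length_nil]
      omega

theorem padTo_val (xs : List Int) (d : Int) : obits (padTo xs d) = obits xs := by
  induction xs using padTo.induct (d := d) with
  | case1 xs h ih =>
      rw [padTo, if_pos h, ih, obits_cons]
      ring
  | case2 xs h => rw [padTo, if_neg h]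

theorem padTo_bits (xs : List Int) (d : Int) : IsBits xs → IsBits (padTo xs d) := by
  induction xs using padTo.induct (d := d) with
  | case1 xs hlt ih =>
      intro h
      rw [padTo, if_pos hlt]
      apply ih
      intro b hb
      rcases List.mem_cons.mp hb with rfl | hb
      · exact Or.inl rfl
      · exact h b hb
  | case2 xs hlt => intro h; rw [padTo, if_neg hlt]; exact h

theorem padTo_len (xs : List Int) (d : Int) : (padTo xs d).length = max xs.length d.toNat := by
  induction xs using padTo.induct (d := d) with
  | case1 xs h ih =>
      rw [padTo, if_pos h, ih]
      simp only [List.length_cons]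
      omega
  | case2 xs h => rw [padTo, if_neg h]; omega

theorem obits_set (xs : List Int) (i : Nat) (v : Int) (h : i < xs.length) :
    obits (xs.set i v) = obits xs + (v - xs[i]) * 2 ^ (xs.length - 1 - i) := by
  induction xs generalizing i with
  | nil => simp at h
  | cons x xs ih =>
      cases i with
      | zero =>
          simp only [List.set_cons_zero, List.getElem_cons_zero, List.length_cons,
            Nat.add_sub_cancel, Nat.sub_zero]
          rw [obits_cons, obits_cons]
          ring
      | succ j =>
          have hj : j < xs.length := by simpa using h
          simp only [List.set_cons_succ, List.getElem_cons_succ]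
          rw [obits_cons, obits_cons, List.length_set, ih j hj]
          have : (x :: xs).length - 1 - (j + 1) = xs.length - 1 - j := by simp; omega
          rw [this]
          ring

theorem obits_get (xs : List Int) :
    IsBits xs → ∀ (i : Nat) (hi : i < xs.length), obits xs / 2 ^ (xs.length - 1 - i) % 2 = xs[i] := by
  induction xs with
  | nil => intro _ i hi; simp at hi
  | cons x xs ih =>
      intro h i hi
      have hx : x = 0 ∨ x = 1 := h x (by simp)
      have hbx : IsBits xs := fun b hb => h b (by simp [hb])
      obtain ⟨hS0, hSlt⟩ := obits_bounds xs hbx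
      cases i with
      | zero =>
          have hlen : (x :: xs).length - 1 - 0 = xs.length := by simp
          rw [hlen, List.getElem_cons_zero]
          have he : obits (x :: xs) = obits xs + x * 2 ^ xs.length := by rw [obits_cons]; ring
          rw [he, Int.add_mul_ediv_right _ _ (by positivity : (2:Int) ^ xs.length ≠ 0),
            Int.ediv_eq_zero_of_lt hS0 hSlt]
          rcases hx with rfl | rfl <;> decide
      | succ j =>
          have hj : j < xs.length := by simpa using hi
          have hlen : (x :: xs).length - 1 - (j + 1) = xs.length - 1 - j := by
            simp only [List.length_cons]; omega
          rw [hlen, List.getElem_cons_succ]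
          have hsplit : (2:Int) ^ xs.length = 2 ^ (j + 1) * 2 ^ (xs.length - 1 - j) := by
            rw [← pow_add]
            congr 1
            omega
          have he : obits (x :: xs) = obits xs + x * 2 ^ (j + 1) * 2 ^ (xs.length - 1 - j) := by
            rw [obits_cons, hsplit]; ring
          rw [he, Int.add_mul_ediv_right _ _ (by positivity : (2:Int) ^ (xs.length - 1 - j) ≠ 0)]
          have hmod : (obits xs / 2 ^ (xs.length - 1 - j) + x * 2 ^ (j + 1)) % 2
              = obits xs / 2 ^ (xs.length - 1 - j) % 2 := by
            have h2 : x * 2 ^ (j + 1) = x * 2 ^ j * 2 := by ring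
            rw [h2]
            generalize obits xs / 2 ^ (xs.length - 1 - j) = s
            generalize x * 2 ^ j = t
            omega
          rw [hmod, ih hbx j hj]

-- ===== VERDICT (by name: the statement is the Claim_ definition above) =====
theorem binary_swap_axes_spec : Claim_equal_binary_swap_axes := by
  intro c axis dimens _ hpre
  obtain ⟨hc, hlo, hhi⟩ := hpre
  unfold Spec_binary_swap_axes
  simp only [binary_swap_axes, binary_swap_axes_alt]
  set BL : Int := (PySem.Int.bitLength c : Int) with hBL
  set LI : Int := max (max dimens BL) 1 with hLI
  set xs := padTo (toBinAux c.toNat) dimens with hxs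
  have hbits : IsBits xs := padTo_bits _ _ (toBin_bits _)
  have hval : obits xs = c := by rw [hxs, padTo_val, toBin_val, Int.toNat_of_nonneg hc]
  have hlen : (xs.length : Int) = LI := by
    rw [hxs, padTo_len, toBin_len, Int.toNat_of_nonneg hc]
    push_cast
    omega
  set L := xs.length with hL
  have hL1 : 1 ≤ L := by omega
  -- the resolved (wrapped) index of binary_c[axis]
  set ia : Nat := if 0 ≤ axis then axis.toNat else L - (-axis).toNat with hia
  have hia_lt : ia < L := by simp only [hia]; split_ifs <;> omega
  have hidx : PySem.List.pyIdx? L axis = some ia := by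
    simp only [PySem.List.pyIdx?, hia]
    split_ifs with h1 h2 h3
    · rfl
    · exact absurd hhi (by omega)
    · rfl
    · exact absurd hlo (by omega)
  have h0lt : 0 < L := hL1
  set va := xs[ia] with hva
  set v0 := xs[0]'h0lt with hv0
  have hva_bit : va = 0 ∨ va = 1 := hbits va (by rw [hva]; exact List.getElem_mem _)
  have hv0_bit : v0 = 0 ∨ v0 = 1 := hbits v0 (by rw [hv0]; exact List.getElem_mem _)
  -- the two reads
  have hget_axis : PySem.List.pyGetD xs axis 0 = va := by
    simp only [PySem.List.pyGetD, PySem.List.pyGet?, ← hL, hidx]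
    simp [List.getElem?_eq_getElem hia_lt, hva]
  have hget_zero : PySem.List.pyGetD xs 0 0 = v0 := by
    have : PySem.List.pyIdx? L 0 = some 0 := by
      simp only [PySem.List.pyIdx?]
      rw [if_pos le_rfl, if_pos (show (0:Int) < (L:Int) by omega)]
      rfl
    simp only [PySem.List.pyGetD, PySem.List.pyGet?, ← hL, this]
    simp [List.getElem?_eq_getElem h0lt, hv0]
  -- the two writes
  have hset0 : PySem.List.pySetD xs 0 va = xs.set 0 va := by
    rw [PySem.List.pySetD_of_nonneg xs va le_rfl]
    rfl
  have hsetA : PySem.List.pySetD (xs.set 0 va) axis v0 = (xs.set 0 va).set ia v0 := by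
    simp only [PySem.List.pySetD, PySem.List.pySet?, List.length_set, ← hL, hidx]
    rfl
  rw [hget_axis, hget_zero, hset0, hsetA]
  -- the final list is still a 0/1 list
  have hbits2 : IsBits ((xs.set 0 va).set ia v0) := by
    intro b hb
    rcases List.mem_or_eq_of_mem_set hb with hb | rfl
    · rcases List.mem_or_eq_of_mem_set hb with hb | rfl
      · exact hbits b hb
      · exact hva_bit
    · exact hv0_bit
  rw [borfold_eq_obits _ hbits2]
  -- value of A's side
  have hmid : (xs.set 0 va)[ia]'(by rw [List.length_set]; exact hia_lt) = va := by
    rw [List.getElem_set]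
    split_ifs with h0
    · rfl
    · exact hva.symm
  have hA : obits ((xs.set 0 va).set ia v0)
      = c + (va - v0) * 2 ^ (L - 1) + (v0 - va) * 2 ^ (L - 1 - ia) := by
    rw [obits_set _ ia v0 (by rw [List.length_set]; exact hia_lt), hmid,
      obits_set _ 0 va h0lt, hval, List.length_set]
    have : L - 1 - 0 = L - 1 := by omega
    rw [← hv0, this]
  rw [hA]
  -- value of B's side
  have hiB : (if axis ≥ 0 then axis else LI + axis) = (ia : Int) := by
    simp only [hia, ge_iff_le]
    split_ifs <;> omega
  rw [hiB]
  have hhiN : (LI - 1).toNat = L - 1 := by omega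
  have hloN : (LI - 1 - (ia : Int)).toNat = L - 1 - ia := by omega
  rw [hhiN, hloN]
  have hpow1 : (0:Int) < 2 ^ (L - 1) := by positivity
  have hpow2 : (0:Int) < 2 ^ (L - 1 - ia) := by positivity
  rw [PySem.Int.floordiv_eq_ediv_of_pos hpow1, PySem.Int.mod_eq_emod_of_pos (by norm_num),
    PySem.Int.floordiv_eq_ediv_of_pos hpow2, PySem.Int.mod_eq_emod_of_pos (by norm_num)]
  have hbh : c / 2 ^ (L - 1) % 2 = v0 := by
    have := obits_get xs hbits 0 h0lt
    rw [hval] at this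
    rw [show L - 1 = L - 1 - 0 from by omega]
    rw [this, hv0]
  have hbl : c / 2 ^ (L - 1 - ia) % 2 = va := by
    have := obits_get xs hbits ia hia_lt
    rw [hval] at this
    rw [this, hva]
  rw [hbh, hbl]
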